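-- pv_equiv track=rewrite | github.com/Aasthaengg/IBMdataset | Python_codes/p02971/s172523637.py | solve
-- ===== SOURCE A (Python) =====
-- from collections import Counter
--
-- def solve(n,a):
--   d = Counter(a)
--   if len(d) == 1:
--     return a
--   d_lst = list(sorted(d.keys()))
--   first = d_lst[-1]
--   second = d_lst[-2]
--   if d[first] != 1:
--     return [first]*n
--   else: # first は一つだけ
--     return [second if a[i] == first else first for i in range(n)]
-- ===== SOURCE B (Python) =====
-- def solve(n, a):
--     # single scan tracking the largest value m1, its multiplicity c1,
--     # and the second-largest distinct value m2 (None while all seen are equal)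
--     m1 = a[0]
--     c1 = 1
--     m2 = None
--     for x in a[1:]:
--         if x > m1:
--             m2 = m1
--             m1 = x
--             c1 = 1
--         elif x == m1:
--             c1 += 1
--         elif m2 is None or x > m2:
--             m2 = x
--     if m2 is None:
--         return a
--     if c1 > 1:
--         return [m1] * n
--     return [m2 if a[i] == m1 else m1 for i in range(n)]
-- ===== Notes on version B (the rewrite author's own statement) =====
-- stated objective: faster
-- what changed: Replaces A's Counter build plus sort of the distinct keys by a single linear scan maintaining the running maximum, its multiplicity and the second-largest distinct value.
import Mathlib
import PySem

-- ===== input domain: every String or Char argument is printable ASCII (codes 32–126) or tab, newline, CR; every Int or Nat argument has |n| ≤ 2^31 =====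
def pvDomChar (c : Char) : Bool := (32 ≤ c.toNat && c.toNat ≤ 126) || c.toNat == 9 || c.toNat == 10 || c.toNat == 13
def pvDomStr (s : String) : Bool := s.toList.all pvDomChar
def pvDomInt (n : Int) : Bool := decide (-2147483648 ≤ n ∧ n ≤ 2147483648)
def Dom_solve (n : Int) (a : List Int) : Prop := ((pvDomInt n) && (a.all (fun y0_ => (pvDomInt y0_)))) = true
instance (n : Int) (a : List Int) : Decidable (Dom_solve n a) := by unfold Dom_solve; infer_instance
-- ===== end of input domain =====

-- B replaces A's Counter + sorted-distinct-keys computation by one linear scan keeping the running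
-- maximum, its multiplicity and the second-largest distinct value (objective: faster; measured faster in a timing run).

-- ===== PORT A =====
def solve (n : Int) (a : List Int) : List Int :=
  let d := PySem.Dict.counter a
  if d.keys.length == 1 then a
  else
    let d_lst := PySem.List.sorted d.keys (fun x => x) false
    let first := (PySem.List.pyGet? d_lst (-1)).getD 0
    let second := (PySem.List.pyGet? d_lst (-2)).getD 0
    if d.getD first 0 ≠ 1 then PySem.List.pyRepeat [first] n
    else (PySem.List.pyRange 0 n 1).map
      (fun i => if (PySem.List.pyGet? a i).getD 0 == first then second else first)

-- ===== PORT B =====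
-- one step of B's scan over the tail: state (m1, c1, m2)
def stepB (st : Int × Int × Option Int) (x : Int) : Int × Int × Option Int :=
  if st.1 < x then (x, 1, some st.1)
  else if x == st.1 then (st.1, st.2.1 + 1, st.2.2)
  else
    match st.2.2 with
    | none => (st.1, st.2.1, some x)
    | some v => if v < x then (st.1, st.2.1, some x) else st

def solve_alt (n : Int) (a : List Int) : List Int :=
  match a with
  | [] => []   -- Source B raises IndexError on [] (a[0]); excluded by Pre_solve
  | h :: t =>
    let st := t.foldl stepB (h, 1, none)
    match st.2.2 with
    | none => a
    | some m2 =>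
      if 1 < st.2.1 then PySem.List.pyRepeat [st.1] n
      else (PySem.List.pyRange 0 n 1).map
        (fun i => if (PySem.List.pyGet? a i).getD 0 == st.1 then m2 else st.1)

-- ===== PRECONDITION & SPEC =====
-- helper for Pre_ only: max of a list (0 on [])
def listMax (a : List Int) : Int :=
  match a with
  | [] => 0
  | h :: t => t.foldl max h

-- Pre_ excludes exactly the inputs where the Python A raises: the empty list (IndexError on
-- d_lst[-1]), and n > len(a) in the unique-maximum branch (IndexError on a[i]); B raises there too.
def Pre_solve (n : Int) (a : List Int) : Prop :=
  a ≠ [] ∧ ((a.length : Int) < n →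
    ¬ (a.count (listMax a) = 1 ∧ ∃ x ∈ a, x ≠ listMax a))
instance (n : Int) (a : List Int) : Decidable (Pre_solve n a) := by unfold Pre_solve; infer_instance

def pvWitness_solve : Int × List Int := (3, [1, 2, 2])

def Spec_solve (n : Int) (a : List Int) (out : List Int) : Prop := out = solve_alt n a
instance (n : Int) (a : List Int) (out : List Int) : Decidable (Spec_solve n a out) := by unfold Spec_solve; infer_instance

-- ===== CLAIM (what is proved, stated in full; the proofs are below) =====
def Claim_equal_solve : Prop := ∀ (n : Int) (a : List Int), Dom_solve n a → Pre_solve n a → Spec_solve n a (solve n a)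

-- ===== LEMMAS AND PROOFS =====

-- invariant of B's scan after having seen the (nonempty) prefix s
def InvB (s : List Int) (st : Int × Int × Option Int) : Prop :=
  st.1 ∈ s ∧ (∀ x ∈ s, x ≤ st.1) ∧ st.2.1 = (s.count st.1 : Int) ∧
  (match st.2.2 with
   | none => ∀ x ∈ s, x = st.1
   | some v => v ∈ s ∧ v < st.1 ∧ ∀ x ∈ s, x ≠ st.1 → x ≤ v)

lemma invB_step (s : List Int) (st : Int × Int × Option Int) (x : Int)
    (h : InvB s st) : InvB (s ++ [x]) (stepB st x) := by
  obtain ⟨hmem, hub, hcnt, hm2⟩ := h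
  unfold stepB InvB
  by_cases h1 : st.1 < x
  · -- x is a new strict maximum
    have hcx : s.count x = 0 := List.count_eq_zero.mpr (fun hx => absurd (hub x hx) (by omega))
    simp only [if_pos h1]
    refine ⟨by simp, ?_, ?_, by simp [hmem], h1, ?_⟩
    · intro y hy
      rcases List.mem_append.mp hy with hy | hy
      · exact le_of_lt (lt_of_le_of_lt (hub y hy) h1)
      · simp at hy; omega
    · simp [List.count_append, hcx]
    · intro y hy hne
      rcases List.mem_append.mp hy with hy | hy
      · exact hub y hy
      · simp at hy; omega
  · by_cases h2 : x = st.1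
    · -- x equals the current maximum
      simp only [if_neg h1, if_pos (beq_iff_eq.mpr h2)]
      refine ⟨by simp [hmem], ?_, ?_, ?_⟩
      · intro y hy
        rcases List.mem_append.mp hy with hy | hy
        · exact hub y hy
        · simp at hy; omega
      · simp [List.count_append, h2, hcnt]
      · rcases hst : st.2.2 with _ | v
        · rw [hst] at hm2
          intro y hy
          rcases List.mem_append.mp hy with hy | hy
          · exact hm2 y hy
          · simp at hy; omega
        · rw [hst] at hm2
          obtain ⟨hv1, hv2, hv3⟩ := hm2
          refine ⟨by simp [hv1], hv2, ?_⟩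
          intro y hy hne
          rcases List.mem_append.mp hy with hy | hy
          · exact hv3 y hy hne
          · simp at hy; omega
    · -- x < st.1
      have h3 : x < st.1 := by omega
      have hne : (x == st.1) = false := beq_eq_false_iff_ne.mpr h2
      simp only [if_neg h1, hne, Bool.false_eq_true, if_false]
      have hubx : ∀ y ∈ s ++ [x], y ≤ st.1 := by
        intro y hy
        rcases List.mem_append.mp hy with hy | hy
        · exact hub y hy
        · simp at hy; omega
      have hcx : (s ++ [x]).count st.1 = s.count st.1 := by
        simp [List.count_append, h2]
      rcases hst : st.2.2 with _ | v
      · rw [hst] at hm2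
        refine ⟨by simp [hmem], hubx, by simp [hcx, hcnt], by simp, h3, ?_⟩
        intro y hy hyne
        rcases List.mem_append.mp hy with hy | hy
        · exact absurd (hm2 y hy) hyne
        · simp at hy; omega
      · rw [hst] at hm2
        obtain ⟨hv1, hv2, hv3⟩ := hm2
        by_cases h4 : v < x
        · simp only [if_pos h4]
          refine ⟨by simp [hmem], hubx, by simp [hcx, hcnt], by simp, h3, ?_⟩
          intro y hy hyne
          rcases List.mem_append.mp hy with hy | hy
          · exact le_of_lt (lt_of_le_of_lt (hv3 y hy hyne) h4)
          · simp at hy; omega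
        · simp only [if_neg h4, hst]
          refine ⟨by simp [hmem], hubx, by simp [hcx, hcnt], by simp [hv1], hv2, ?_⟩
          intro y hy hyne
          rcases List.mem_append.mp hy with hy | hy
          · exact hv3 y hy hyne
          · simp at hy; omega

lemma invB_fold (l : List Int) : ∀ (s : List Int) (st : Int × Int × Option Int),
    InvB s st → InvB (s ++ l) (l.foldl stepB st) := by
  induction l with
  | nil => intro s st h; simpa using h
  | cons x l ih =>
    intro s st h
    have := ih (s ++ [x]) (stepB st x) (invB_step s st x h)
    simpa using this

lemma invB_run (h : Int) (t : List Int) : InvB (h :: t) (t.foldl stepB (h, 1, none)) := by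
  have base : InvB [h] ((h, 1, none) : Int × Int × Option Int) := by
    refine ⟨by simp, by simp, by simp, ?_⟩
    intro x hx; simpa using hx
  simpa using invB_fold t [h] (h, 1, none) base

lemma nodup_all_eq (S : List Int) (u : Int) (hnd : S.Nodup) (hu : u ∈ S)
    (hall : ∀ x ∈ S, x = u) : S = [u] := by
  match S with
  | [] => simp at hu
  | y :: ys =>
    have hy : y = u := hall y (by simp)
    have hys : ys = [] := by
      match ys with
      | [] => rfl
      | z :: zs =>
        have hz : z = u := hall z (by simp)
        simp [hy, hz] at hnd
    simp [hy, hys]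

lemma ofList_len_one_iff (h : Int) (t : List Int) :
    (PySem.Set.ofList (h :: t)).length = 1 ↔ ∀ x ∈ (h :: t), x = h := by
  constructor
  · intro hlen x hx
    obtain ⟨u, hu⟩ := List.length_eq_one_iff.mp hlen
    have hh : h ∈ PySem.Set.ofList (h :: t) := (PySem.Set.mem_ofList _ _).mpr (by simp)
    have hx' : x ∈ PySem.Set.ofList (h :: t) := (PySem.Set.mem_ofList _ _).mpr hx
    rw [hu] at hh hx'
    simp at hh hx'
    omega
  · intro hall
    have : PySem.Set.ofList (h :: t) = [h] :=
      nodup_all_eq _ h (PySem.Set.nodup_ofList _)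
        ((PySem.Set.mem_ofList _ _).mpr (by simp))
        (fun x hx => hall x ((PySem.Set.mem_ofList _ _).mp hx))
    simp [this]

-- ===== VERDICT (by name: the statement is the Claim_ definition above) =====
theorem solve_spec : Claim_equal_solve := by
  unfold Claim_equal_solve
  intro n a _ hpre
  unfold Spec_solve
  obtain ⟨hne, -⟩ := hpre
  match a with
  | [] => exact absurd rfl hne
  | h :: t =>
    obtain ⟨hmem, hub, hcnt, hm2⟩ := invB_run h t
    unfold solve solve_alt
    simp only [PySem.Dict.keys_counter]
    rcases hst : (t.foldl stepB (h, 1, none)).2.2 with _ | m2v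
    · -- all elements equal: both sides return a
      rw [hst] at hm2
      have hall : ∀ x ∈ h :: t, x = h := by
        have hh := hm2 h (by simp)
        intro x hx
        rw [hm2 x hx, ← hh]
      have hlen : (PySem.Set.ofList (h :: t)).length = 1 := (ofList_len_one_iff h t).mpr hall
      simp [hlen]
    · rw [hst] at hm2
      obtain ⟨hv1, hv2, hv3⟩ := hm2
      set m1 := (t.foldl stepB (h, 1, none)).1 with hm1def
      have hnotall : ¬ ∀ x ∈ h :: t, x = h := by
        intro hall
        have e1 := hall m1 hmem
        have e2 := hall m2v hv1
        omega
      have hlen1 : (PySem.Set.ofList (h :: t)).length ≠ 1 :=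
        fun hl => hnotall ((ofList_len_one_iff h t).mp hl)
      set L := PySem.List.sorted (PySem.Set.ofList (h :: t)) (fun x => x) false with hLdef
      have hLperm : L.Perm (PySem.Set.ofList (h :: t)) := PySem.List.sorted_perm _ _ _
      have hLnd : L.Nodup := hLperm.nodup_iff.mpr (PySem.Set.nodup_ofList _)
      have hLmem : ∀ x : Int, x ∈ L ↔ x ∈ h :: t := by
        intro x
        rw [hLdef, PySem.List.mem_sorted, PySem.Set.mem_ofList]
      have hLlen : 2 ≤ L.length := by
        have h0 : (PySem.Set.ofList (h :: t)).length ≠ 0 := by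
          intro h0
          have := (PySem.Set.mem_ofList (h :: t) h).mpr (by simp)
          rw [List.length_eq_zero_iff.mp h0] at this
          simp at this
        have := hLperm.length_eq
        omega
      have hget1 : (PySem.List.pyGet? L (-1)).getD 0 = L[L.length - 1]'(by omega) := by
        rw [PySem.List.pyGet?_neg_ofNat L 1 (by norm_num) (by omega)]
        simp [List.getElem?_eq_getElem (by omega : L.length - 1 < L.length)]
      have hget2 : (PySem.List.pyGet? L (-2)).getD 0 = L[L.length - 2]'(by omega) := by
        rw [PySem.List.pyGet?_neg_ofNat L 2 (by norm_num) (by omega)]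
        simp [List.getElem?_eq_getElem (by omega : L.length - 2 < L.length)]
      -- the last element of the sorted distinct list is the running maximum m1
      have hfirst : L[L.length - 1]'(by omega) = m1 := by
        apply le_antisymm
        · exact hub _ ((hLmem _).mp (List.getElem_mem _))
        · obtain ⟨j, hj, hjeq⟩ := List.getElem_of_mem ((hLmem m1).mpr hmem)
          calc m1 = L[j] := hjeq.symm
            _ ≤ L[L.length - 1]'(by omega) :=
                PySem.List.sorted_id_getElem_mono _ (by show j ≤ L.length - 1; omega)
                  (by show L.length - 1 < L.length; omega)
      -- the second-to-last element is the second-largest distinct value m2v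
      have hsecond : L[L.length - 2]'(by omega) = m2v := by
        have hne12 : L[L.length - 2]'(by omega) ≠ L[L.length - 1]'(by omega) := by
          intro he
          have := (List.Nodup.getElem_inj_iff hLnd).mp he
          omega
        apply le_antisymm
        · refine hv3 _ ((hLmem _).mp (List.getElem_mem _)) ?_
          rw [← hfirst]
          exact hne12
        · obtain ⟨j, hj, hjeq⟩ := List.getElem_of_mem ((hLmem m2v).mpr hv1)
          have hjne : j ≠ L.length - 1 := by
            intro he
            subst he
            rw [hfirst] at hjeq
            omega
          calc m2v = L[j] := hjeq.symm
            _ ≤ L[L.length - 2]'(by omega) :=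
                PySem.List.sorted_id_getElem_mono _ (by show j ≤ L.length - 2; omega)
                  (by show L.length - 2 < L.length; omega)
      rw [hget1, hget2, hfirst, hsecond, if_neg (by simpa using hlen1)]
      -- counts agree
      have hcntA : (PySem.Dict.counter (h :: t)).getD m1 0 = ((h :: t).count m1 : Int) :=
        PySem.Dict.getD_counter _ _
      have hpos : 0 < (h :: t).count m1 := List.count_pos_iff.mpr hmem
      by_cases hc : (h :: t).count m1 = 1
      · simp [hcntA, hc, hcnt]
      · have : (PySem.Dict.counter (h :: t)).getD m1 0 ≠ 1 := by
          rw [hcntA]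
          exact_mod_cast hc
        simp only [if_pos this]
        have h2le : 1 < (t.foldl stepB (h, 1, none)).2.1 := by
          rw [hcnt]
          omega
        rw [if_pos h2le]
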